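-- pv_equiv track=rewrite | github.com/vzaichikov/victorgram | app.py | keep_last_image_only
-- ===== SOURCE A (Python) =====
-- def keep_last_image_only(messages):
--     last_index = None
--     last_image = None
--     for i, msg in enumerate(messages):
--         for part in msg["content"]:
--             if part.get("type") == "image_url":
--                 last_index = i
--                 last_image = part
--     if last_index is None:
--         return messages
--     for msg in messages:
--         msg["content"] = [p for p in msg["content"] if p.get("type") != "image_url"]
--     messages[last_index]["content"].append(last_image)
--     return messages
-- ===== SOURCE B (Python) =====
-- def keep_last_image_only(messages):
--     # Guard first: if no image part exists anywhere, leave everything untouched.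
--     if not any(p.get("type") == "image_url" for m in messages for p in m["content"]):
--         return messages
--     # Single right-to-left pass, no index bookkeeping: the first image-bearing
--     # message seen from the end holds the overall last image; it keeps that
--     # image (appended after its non-image parts), every other message is
--     # stripped of image parts.
--     pending = True
--     for msg in reversed(messages):
--         imgs = [p for p in msg["content"] if p.get("type") == "image_url"]
--         rest = [p for p in msg["content"] if p.get("type") != "image_url"]
--         if pending and imgs:
--             msg["content"] = rest + [imgs[-1]]
--             pending = False
--         else:
--             msg["content"] = rest
--     return messages
-- ===== Notes on version B (the rewrite author's own statement) =====
-- stated objective: alternative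
-- what changed: B first tests with any() whether an image part exists at all, then does one right-to-left pass with a pending flag that gives the first image-bearing message from the end its own last image and strips every other message, instead of A's enumerate scan tracking last_index/last_image followed by a separate strip pass and an indexed append.
import Mathlib
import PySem

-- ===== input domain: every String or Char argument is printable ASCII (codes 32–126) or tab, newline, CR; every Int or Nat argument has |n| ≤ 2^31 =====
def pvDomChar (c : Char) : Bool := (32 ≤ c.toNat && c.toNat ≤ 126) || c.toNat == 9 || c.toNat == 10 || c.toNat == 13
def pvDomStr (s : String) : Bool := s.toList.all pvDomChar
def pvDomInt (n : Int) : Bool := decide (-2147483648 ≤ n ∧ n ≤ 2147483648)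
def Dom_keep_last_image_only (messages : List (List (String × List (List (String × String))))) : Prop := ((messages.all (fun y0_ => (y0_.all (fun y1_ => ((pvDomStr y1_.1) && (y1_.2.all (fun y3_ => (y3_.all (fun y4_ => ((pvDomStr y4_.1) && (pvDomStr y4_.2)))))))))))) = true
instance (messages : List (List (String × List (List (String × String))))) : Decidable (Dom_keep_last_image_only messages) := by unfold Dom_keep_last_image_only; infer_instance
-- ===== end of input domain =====

-- B replaces A's forward enumerate scan + separate strip pass + indexed append by an any() guard
-- and one right-to-left pass with a pending flag. Equivalence is about the RETURN value only:
-- the Python A and B mutate the message dicts in place, the Lean ports rebuild them.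

-- ===== PORT A =====
-- msg["content"]  (none = KeyError, excluded by Pre_)
def pvContent (msg : List (String × List (List (String × String)))) : List (List (String × String)) :=
  ((PySem.Dict.mk msg).get? "content").getD []

-- part.get("type") == "image_url"
def pvIsImg (p : List (String × String)) : Bool :=
  (PySem.Dict.mk p).get? "type" == some "image_url"

def keep_last_image_only (messages : List (List (String × List (List (String × String))))) : List (List (String × List (List (String × String)))) :=
  let st := (PySem.List.enumerate messages).foldl
      (fun st im =>
        (pvContent im.2).foldl
          (fun st part => if pvIsImg part then (some im.1, some part) else st) st)
      ((none : Option Int), (none : Option (List (String × String))))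
  match st with
  | (some li, some img) =>
    let ms := messages.map (fun msg =>
      ((PySem.Dict.mk msg).insert "content" ((pvContent msg).filter (fun p => !pvIsImg p))).items)
    -- li comes from enumerate, hence 0 ≤ li: `.toNat` is exact here
    ms.modify li.toNat (fun m => ((PySem.Dict.mk m).modify "content" [] (· ++ [img])).items)
  | _ => messages

-- ===== PORT B =====
-- m["content"] for B (none = KeyError, excluded by Pre_)
def pvCont (m : List (String × List (List (String × String)))) : List (List (String × String)) :=
  ((PySem.Dict.mk m).get? "content").getD []

-- p.get("type") == "image_url": a missing key gives None, which never equals the string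
def pvTyIs (p : List (String × String)) : Bool :=
  ((PySem.Dict.mk p).get? "type").getD "" == "image_url"

-- the reversed(messages) loop with the pending flag: the tail (later messages) is
-- processed first, `pending` flows from it to the head; returns (new list, pending)
def pvProc : List (List (String × List (List (String × String)))) → List (List (String × List (List (String × String)))) × Bool
  | [] => ([], true)
  | m :: rest =>
    let (tail, pending) := pvProc rest
    let imgs := (pvCont m).filter pvTyIs
    let keep := (pvCont m).filter (fun p => !pvTyIs p)
    if pending && !imgs.isEmpty then
      -- imgs[-1]: the branch guarantees imgs ≠ [], the .getD [] is never taken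
      (((PySem.Dict.mk m).insert "content" (keep ++ [(PySem.List.pyGet? imgs (-1)).getD []])).items :: tail, false)
    else
      (((PySem.Dict.mk m).insert "content" keep).items :: tail, pending)

def keep_last_image_only_alt (messages : List (List (String × List (List (String × String))))) : List (List (String × List (List (String × String)))) :=
  if messages.any (fun m => (pvCont m).any pvTyIs) then (pvProc messages).1
  else messages

-- ===== PRECONDITION & SPEC =====
-- Pre_ excludes exactly the inputs where the Python A raises KeyError: a message without a "content" key.
def Pre_keep_last_image_only (messages : List (List (String × List (List (String × String))))) : Prop :=
  ∀ msg ∈ messages, ((PySem.Dict.mk msg).get? "content").isSome = true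
instance (messages : List (List (String × List (List (String × String))))) : Decidable (Pre_keep_last_image_only messages) := by unfold Pre_keep_last_image_only; infer_instance

def pvWitness_keep_last_image_only : (List (List (String × List (List (String × String))))) :=
  [[("content", [[("type", "text")], [("type", "image_url"), ("url", "x")]])],
   [("content", [[("type", "image_url"), ("url", "y")]])]]

def Spec_keep_last_image_only (messages : List (List (String × List (List (String × String))))) (out : List (List (String × List (List (String × String))))) : Prop := out = keep_last_image_only_alt messages
instance (messages : List (List (String × List (List (String × String))))) (out : List (List (String × List (List (String × String))))) : Decidable (Spec_keep_last_image_only messages out) := by unfold Spec_keep_last_image_only; infer_instance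

-- ===== CLAIM (what is proved, stated in full; the proofs are below) =====
def Claim_equal_keep_last_image_only : Prop := ∀ (messages : List (List (String × List (List (String × String))))), Dom_keep_last_image_only messages → Pre_keep_last_image_only messages → Spec_keep_last_image_only messages (keep_last_image_only messages)

-- ===== LEMMAS AND PROOFS =====

-- B's part test equals A's
theorem pvTy_eq (p : List (String × String)) : pvTyIs p = pvIsImg p := by
  unfold pvTyIs pvIsImg
  cases (PySem.Dict.mk p).get? "type" <;> simp

-- what stripping / appending does to one message, as the proofs see it
def pvStripM (msg : List (String × List (List (String × String)))) : List (String × List (List (String × String))) :=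
  ((PySem.Dict.mk msg).insert "content" ((pvContent msg).filter (fun p => !pvIsImg p))).items

def pvAppM (img : List (String × String)) (m : List (String × List (List (String × String)))) : List (String × List (List (String × String))) :=
  ((PySem.Dict.mk m).modify "content" [] (· ++ [img])).items

-- position (from the head) and value of the overall last image part
def pvHitN : List (List (String × List (List (String × String)))) → Option (Nat × List (String × String))
  | [] => none
  | m :: t =>
    match pvHitN t with
    | some (j, p) => some (j + 1, p)
    | none => (((pvContent m).filter pvIsImg).getLast?).map (fun p => (0, p))

-- A's inner loop over one content list
theorem pv_foldInner (i : Int) (c : List (List (String × String))) (s : Option Int × Option (List (String × String))) :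
    c.foldl (fun st part => if pvIsImg part then (some i, some part) else st) s
      = match (c.filter pvIsImg).getLast? with
        | none => s
        | some p => (some i, some p) := by
  induction c generalizing s with
  | nil => simp
  | cons x t ih =>
    simp only [List.foldl_cons, List.filter_cons]
    by_cases hx : pvIsImg x = true
    · simp only [hx, if_true, ih]
      cases h : (t.filter pvIsImg).getLast? <;> simp [h, List.getLast?_cons]
    · simp [hx, ih]

-- A's outer loop computes pvHitN (with the running enumerate offset s)
theorem pv_foldA (l : List (List (String × List (List (String × String))))) (s : Int)
    (st : Option Int × Option (List (String × String))) :
    (PySem.List.enumerate l s).foldl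
      (fun st im =>
        (pvContent im.2).foldl
          (fun st part => if pvIsImg part then (some im.1, some part) else st) st) st
      = match pvHitN l with
        | none => st
        | some (j, p) => (some (s + j), some p) := by
  induction l generalizing s st with
  | nil => simp [pvHitN, PySem.List.enumerate_nil]
  | cons m t ih =>
    rw [PySem.List.enumerate_cons, List.foldl_cons]
    dsimp only
    rw [pv_foldInner, ih]
    simp only [pvHitN]
    cases h : pvHitN t with
    | some pr =>
      obtain ⟨j, p⟩ := pr
      simp only []
      congr 2
      omega
    | none =>
      cases hg : ((pvContent m).filter pvIsImg).getLast? <;> simp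

-- appending after stripping is one dict update
theorem pv_app_strip (m : List (String × List (List (String × String)))) (p : List (String × String)) :
    pvAppM p (pvStripM m)
      = ((PySem.Dict.mk m).insert "content" ((pvContent m).filter (fun q => !pvIsImg q) ++ [p])).items := by
  unfold pvAppM pvStripM
  congr 1
  show ((PySem.Dict.mk m).insert "content" _).insert "content"
      ((((PySem.Dict.mk m).insert "content" _).getD "content" []) ++ [p]) = _
  rw [PySem.Dict.getD_insert_self, PySem.Dict.insert_insert_self]

-- B's reversed pass computes: strip everything, append the hit at its position,
-- pending reports whether no image was seen
theorem pv_proc (l : List (List (String × List (List (String × String))))) :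
    pvProc l = match pvHitN l with
      | none => (l.map pvStripM, true)
      | some (j, p) => ((l.map pvStripM).modify j (pvAppM p), false) := by
  induction l with
  | nil => rfl
  | cons m t ih =>
    have hty : pvTyIs = pvIsImg := funext pvTy_eq
    rw [pvProc, ih]
    cases h : pvHitN t with
    | some pr =>
      obtain ⟨j, p⟩ := pr
      show (if false && _ then _ else _) = _
      rw [Bool.false_and, if_neg (by simp), hty]
      simp only [pvHitN, h, List.map_cons, List.modify_succ_cons]
      rfl
    | none =>
      simp only [pvHitN, h]
      rw [show pvCont m = pvContent m from rfl, hty]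
      cases hg : ((pvContent m).filter pvIsImg).getLast? with
      | none =>
        have himgs : (pvContent m).filter pvIsImg = [] :=
          List.getLast?_eq_none_iff.mp hg
        rw [himgs]
        show (if true && !List.isEmpty [] then _ else _) = _
        rw [if_neg (by simp)]
        rfl
      | some p =>
        have hne : (pvContent m).filter pvIsImg ≠ [] := by
          intro hf; rw [hf] at hg; simp at hg
        have hpos : 0 < ((pvContent m).filter pvIsImg).length :=
          List.length_pos_iff.mpr hne
        have hlast : PySem.List.pyGet? ((pvContent m).filter pvIsImg) (-1) = some p := by
          rw [PySem.List.pyGet?_neg_ofNat _ 1 (by omega) (by omega),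
            ← List.getLast?_eq_getElem?, hg]
        rw [if_pos (by simp [hne]), hlast]
        simp only [Option.map_some, Option.getD_some, List.map_cons, List.modify_zero_cons,
          pv_app_strip]

-- the any() guard is exactly "a hit exists"
theorem pv_any (l : List (List (String × List (List (String × String))))) :
    l.any (fun m => (pvCont m).any pvTyIs) = (pvHitN l).isSome := by
  induction l with
  | nil => rfl
  | cons m t ih =>
    have hty : pvTyIs = pvIsImg := funext pvTy_eq
    rw [List.any_cons, ih, show pvCont m = pvContent m from rfl, hty]
    cases h : pvHitN t with
    | some pr =>
      simp only [pvHitN, h, Option.isSome_some, Bool.or_true]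
    | none =>
      simp only [pvHitN, h, Option.isSome_none, Bool.or_false]
      cases hg : ((pvContent m).filter pvIsImg).getLast? with
      | none =>
        have himgs : (pvContent m).filter pvIsImg = [] :=
          List.getLast?_eq_none_iff.mp hg
        simp only [Option.map_none, Option.isSome_none]
        rw [List.any_eq_false]
        intro x hx hix
        have : x ∈ (pvContent m).filter pvIsImg := List.mem_filter.mpr ⟨hx, hix⟩
        rw [himgs] at this
        exact absurd this (List.not_mem_nil)
      | some p =>
        have hp := List.mem_of_getLast? hg
        have := List.mem_filter.mp hp
        simp only [Option.map_some, Option.isSome_some]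
        rw [List.any_eq_true]
        exact ⟨p, this.1, this.2⟩

-- ===== VERDICT (by name: the statement is the Claim_ definition above) =====
theorem keep_last_image_only_spec : Claim_equal_keep_last_image_only := by
  intro messages _ _
  unfold Spec_keep_last_image_only keep_last_image_only keep_last_image_only_alt
  rw [pv_foldA, pv_any]
  cases h : pvHitN messages with
  | none => simp
  | some pr =>
    obtain ⟨j, p⟩ := pr
    rw [pv_proc, h]
    simp only [Option.isSome_some, if_true]
    show (messages.map pvStripM).modify ((0 : Int) + (j : Int)).toNat (pvAppM p)
        = (messages.map pvStripM).modify j (pvAppM p)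
    congr 1
    omega
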